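-- pv_equiv track=rewrite | github.com/everysoftware/algorithms-course | src/greedy/implementation/max_terms.py | max_terms
-- ===== SOURCE A (Python) =====
-- def max_terms(n: int) -> list:
--     result = []
--     s = 0
--     tmp = n
--     for x in range(1, n + 1):
--         n -= x
--         if n >= x + 1:
--             result.append(x)
--             s += x
--         else:
--             result.append(tmp - s)
--             break
--     return result
-- ===== SOURCE B (Python) =====
-- def max_terms(n: int) -> list:
--     if n < 1:
--         return []
--     # binary search for the largest u with u*(u+1) <= 2*n
--     lo, hi = 1, n
--     while lo < hi:
--         mid = (lo + hi + 1) // 2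
--         if mid * (mid + 1) <= 2 * n:
--             lo = mid
--         else:
--             hi = mid - 1
--     u = lo
--     return list(range(1, u)) + [n - (u - 1) * u // 2]
-- ===== Notes on version B (the rewrite author's own statement) =====
-- stated objective: faster
-- what changed: Replaces the term-by-term subtraction loop by a logarithmic binary search for the break point u (the largest u whose triangular number fits in n), then emits the initial run of terms and the absorbing last term directly.
import Mathlib
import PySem

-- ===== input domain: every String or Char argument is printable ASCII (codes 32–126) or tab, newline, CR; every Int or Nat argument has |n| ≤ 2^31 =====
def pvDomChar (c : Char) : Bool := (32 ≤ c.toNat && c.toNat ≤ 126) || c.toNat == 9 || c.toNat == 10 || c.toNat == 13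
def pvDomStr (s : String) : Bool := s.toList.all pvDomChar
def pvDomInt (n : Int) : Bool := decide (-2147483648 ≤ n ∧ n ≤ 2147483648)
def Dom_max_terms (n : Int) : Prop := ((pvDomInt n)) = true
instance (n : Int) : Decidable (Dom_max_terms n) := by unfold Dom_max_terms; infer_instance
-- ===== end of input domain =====

-- B replaces A's term-by-term subtraction loop by a binary search for the break
-- point, then emits the answer directly; equivalence is proved for every Int input.

-- ===== PORT A =====
-- A's for-loop with break: recursion over the remaining range, carrying
-- (n, s, tmp, result) exactly as the Python does.
def goA : List Int → Int → Int → Int → List Int → List Int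
  | [], _, _, _, res => res
  | x :: rest, n, s, tmp, res =>
      -- Python's `n -= x` becomes passing `n - x` along (written inline)
      if n - x ≥ x + 1 then goA rest (n - x) (s + x) tmp (res ++ [x])
      else res ++ [tmp - s]

def max_terms (n : Int) : List Int :=
  goA (PySem.List.pyRange 1 (n + 1) 1) n 0 n []

-- ===== PORT B =====
-- B's while-loop binary search for the largest u with u*(u+1) ≤ 2*n; Python's `mid` variable is written inline.
def bsB (n lo hi : Int) : Int :=
  if _h : lo < hi then
    if PySem.Int.floordiv (lo + hi + 1) 2 * (PySem.Int.floordiv (lo + hi + 1) 2 + 1) ≤ 2 * n then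
      bsB n (PySem.Int.floordiv (lo + hi + 1) 2) hi
    else bsB n lo (PySem.Int.floordiv (lo + hi + 1) 2 - 1)
  else lo
termination_by (hi - lo).toNat
decreasing_by
  all_goals
    simp only [PySem.Int.floordiv_eq_ediv_of_pos (by norm_num : (0:Int) < 2)] at *
    omega

def max_terms_alt (n : Int) : List Int :=
  if n < 1 then []
  else
    let u := bsB n 1 n
    PySem.List.pyRange 1 u 1 ++ [n - PySem.Int.floordiv ((u - 1) * u) 2]

-- ===== PRECONDITION & SPEC =====
def Spec_max_terms (n : Int) (out : List Int) : Prop := out = max_terms_alt n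
instance (n : Int) (out : List Int) : Decidable (Spec_max_terms n out) := by unfold Spec_max_terms; infer_instance

-- ===== CLAIM (what is proved, stated in full; the proofs are below) =====
def Claim_equal_max_terms : Prop := ∀ (n : Int), Dom_max_terms n → Spec_max_terms n (max_terms n)

-- ===== LEMMAS AND PROOFS =====

-- The binary search returns the greatest u in [lo,hi] with u*(u+1) ≤ 2*n,
-- given the bracketing invariant.
lemma bsB_spec (n : Int) : ∀ (k : Nat) (lo hi : Int), (hi - lo).toNat = k →
    lo ≤ hi → lo * (lo + 1) ≤ 2 * n → 2 * n < (hi + 1) * (hi + 2) →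
    lo ≤ bsB n lo hi ∧ bsB n lo hi ≤ hi ∧
      bsB n lo hi * (bsB n lo hi + 1) ≤ 2 * n ∧
      2 * n < (bsB n lo hi + 1) * (bsB n lo hi + 2) := by
  intro k
  induction k using Nat.strong_induction_on with
  | _ k ih =>
    intro lo hi hk hle hlo hhi
    rw [bsB]
    by_cases h : lo < hi
    · rw [dif_pos h]
      have hmid : PySem.Int.floordiv (lo + hi + 1) 2 = (lo + hi + 1) / 2 :=
        PySem.Int.floordiv_eq_ediv_of_pos (by norm_num)
      set mid := PySem.Int.floordiv (lo + hi + 1) 2 with hm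
      have hb1 : lo < mid := by omega
      have hb2 : mid ≤ hi := by omega
      by_cases hc : mid * (mid + 1) ≤ 2 * n
      · rw [if_pos hc]
        have := ih (hi - mid).toNat (by omega) mid hi rfl (by omega) hc hhi
        omega
      · rw [if_neg hc]
        have hhi' : 2 * n < (mid - 1 + 1) * (mid - 1 + 2) := by
          have : (mid - 1 + 1) * (mid - 1 + 2) = mid * (mid + 1) := by ring
          omega
        have := ih (mid - 1 - lo).toNat (by omega) lo (mid - 1) rfl (by omega) hlo hhi'
        omega
    · rw [dif_neg h]
      have : lo = hi := by omega
      subst this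
      omega

-- 2*s carries the running triangular sum; break index u is bracketed by
-- u*(u+1) ≤ 2*tmp < (u+1)*(u+2).
lemma goA_spec : ∀ (k : Nat) (u x s tmp : Int) (res : List Int), (u - x).toNat = k →
    1 ≤ x → x ≤ u → 2 * s = x * (x - 1) →
    u * (u + 1) ≤ 2 * tmp → 2 * tmp < (u + 1) * (u + 2) →
    goA (PySem.List.pyRange x (tmp + 1) 1) (tmp - s) s tmp res =
      res ++ PySem.List.pyRange x u 1 ++ [tmp - PySem.Int.floordiv ((u - 1) * u) 2] := by
  intro k
  induction k using Nat.strong_induction_on with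
  | _ k ih =>
    intro u x s tmp res hk hx hxu hs hlo hhi
    have hutmp : u ≤ tmp := by nlinarith
    have hxtmp : x < tmp + 1 := by omega
    rw [PySem.List.pyRange_one_cons hxtmp]
    rw [goA]
    by_cases hc : tmp - s - x ≥ x + 1
    · -- loop continues: x < u
      have hxltu : x < u := by
        by_contra hcon
        have hxe : x = u := by omega
        -- break condition contradicts hhi
        nlinarith [hhi, hs, hc, hxe]
      rw [if_pos hc]
      have hrec := ih (u - (x + 1)).toNat (by omega) u (x + 1) (s + x) tmp (res ++ [x]) rfl
        (by omega) (by omega) (by ring_nf; linarith [hs]) hlo hhi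
      have harg : tmp - s - x = tmp - (s + x) := by ring
      rw [harg, hrec]
      rw [show res ++ PySem.List.pyRange x u 1 = res ++ (x :: PySem.List.pyRange (x + 1) u 1) from by
        rw [PySem.List.pyRange_one_cons hxltu]]
      simp
    · -- break: x = u
      have hxe : x = u := by
        by_contra hcon
        have hxl : x + 1 ≤ u := by omega
        have hmono : (x + 1) * (x + 2) ≤ u * (u + 1) := by nlinarith
        nlinarith [hlo, hs]
      rw [if_neg hc]
      have hdiv : PySem.Int.floordiv ((u - 1) * u) 2 = s := by
        rw [PySem.Int.floordiv_eq_iff_of_pos (by norm_num)]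
        constructor <;> nlinarith [hs, hxe]
      rw [hdiv, hxe]
      simp

-- ===== VERDICT (by name: the statement is the Claim_ definition above) =====
theorem max_terms_spec : Claim_equal_max_terms := by
  intro n _
  unfold Spec_max_terms max_terms max_terms_alt
  by_cases hn : n < 1
  · simp only [hn, if_pos]
    rw [show PySem.List.pyRange 1 (n + 1) 1 = [] from by
      rw [PySem.List.pyRange_one, show (n + 1 - 1).toNat = 0 from by omega]; rfl]
    rfl
  · simp only [hn, if_neg, not_false_iff]
    have h1 : (1 : Int) ≤ n := by omega
    have hbs := bsB_spec n (n - 1).toNat 1 n (by omega) h1 (by nlinarith) (by nlinarith)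
    set u := bsB n 1 n with hu
    have := goA_spec (u - 1).toNat u 1 0 n [] rfl (by omega) (by omega) (by ring) hbs.2.2.1 hbs.2.2.2
    simpa using this
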